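-- pv_equiv track=rewrite | github.com/noraibraheem/College_Projects | os_algorithms/LOCK.py | LOCK
-- ===== SOURCE A (Python) =====
-- def LOCK(arr, head, direction):
--     seek_count = 0
--     left = [] if direction == "left" else []
--     right = [] if direction == "right" else []
--     for i in arr:
--         if i < head:
--             left.append(i)
--         elif i > head:
--             right.append(i)
--     left.sort(reverse=True)
--     right.sort()
--     seek_sequence = []
--     for _ in range(2):
--         if direction == "left":
--             for i in left:
--                 seek_sequence.append(i)
--                 seek_count += abs(head - i)
--                 head = i
--             direction = "right"
--         else:
--             for i in right:
--                 seek_sequence.append(i)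
--                 seek_count += abs(head - i)
--                 head = i
--             direction = "left"
--     return seek_count,seek_sequence
-- ===== SOURCE B (Python) =====
-- def LOCK(arr, head, direction):
--     # One global sort, split index by scanning, closed-form seek count (no walk over the sequence).
--     s = sorted(arr)
--     k = 0
--     while k < len(s) and s[k] < head:
--         k += 1
--     m = k
--     while m < len(s) and s[m] == head:
--         m += 1
--     left = s[:k][::-1]          # values below head, descending
--     right = s[m:]               # values above head, ascending
--     seq = left + right if direction == "left" else right + left
--     if direction == "left":
--         count = (head - left[-1] if left else 0) \
--               + (right[-1] - (left[-1] if left else head) if right else 0)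
--     else:
--         count = (right[-1] - head if right else 0) \
--               + ((right[-1] if right else head) - left[-1] if left else 0)
--     return count, seq
-- ===== Notes on version B (the rewrite author's own statement) =====
-- stated objective: alternative
-- what changed: B sorts the whole array once, finds the split point around head by index scans, takes slices for the two halves, and computes the seek count by a closed-form endpoint formula (span arithmetic on the first/last elements) instead of A's partition-then-two-sorts state machine that walks the sequence accumulating per-step distances.
import Mathlib
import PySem

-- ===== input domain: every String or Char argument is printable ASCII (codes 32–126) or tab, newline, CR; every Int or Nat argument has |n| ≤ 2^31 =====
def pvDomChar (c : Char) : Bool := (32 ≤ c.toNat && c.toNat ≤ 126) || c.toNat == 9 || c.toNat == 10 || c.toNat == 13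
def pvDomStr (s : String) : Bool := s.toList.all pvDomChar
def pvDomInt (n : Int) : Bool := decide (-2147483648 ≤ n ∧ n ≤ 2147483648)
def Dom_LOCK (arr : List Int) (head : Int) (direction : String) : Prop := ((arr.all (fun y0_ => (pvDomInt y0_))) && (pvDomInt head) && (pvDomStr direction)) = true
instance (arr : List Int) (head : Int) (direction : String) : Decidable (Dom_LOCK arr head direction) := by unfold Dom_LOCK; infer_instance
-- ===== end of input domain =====

-- B sorts the whole array once, splits it by index scans, and computes the seek count by a
-- closed-form endpoint formula instead of A's partition/two-sorts/walking state machine; objective: alternative.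


-- ===== PORT A =====
-- A's inner for-loop body: append i to seek_sequence, add |head - i| to seek_count, head := i
def lockStepA (q : Int × List Int × Int) (i : Int) : Int × List Int × Int :=
  (q.1 + |q.2.2 - i|, q.2.1 ++ [i], i)

def LOCK (arr : List Int) (head : Int) (direction : String) : Int × List Int :=
  -- left / right built by one pass over arr (i == head skipped by the elif)
  let lr := arr.foldl (fun (p : List Int × List Int) i =>
    if i < head then (p.1 ++ [i], p.2)
    else if i > head then (p.1, p.2 ++ [i]) else p) ([], [])
  let left := PySem.List.sorted lr.1 (fun x => x) true
  let right := PySem.List.sorted lr.2 (fun x => x) false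
  -- for _ in range(2): state = (seek_count, seek_sequence, head, direction)
  let st := (PySem.List.pyRange 0 2 1).foldl
    (fun (st : Int × List Int × Int × String) _ =>
      if st.2.2.2 == "left" then
        let s := left.foldl lockStepA (st.1, st.2.1, st.2.2.1)
        (s.1, s.2.1, s.2.2, "right")
      else
        let s := right.foldl lockStepA (st.1, st.2.1, st.2.2.1)
        (s.1, s.2.1, s.2.2, "left"))
    (0, [], head, direction)
  (st.1, st.2.1)

-- ===== PORT B =====
-- 'while k < len(s) and s[k] < head: k += 1' — length of the leading run of elements < head
def lockRunLT (head : Int) : List Int → Nat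
  | [] => 0
  | x :: t => if x < head then lockRunLT head t + 1 else 0

-- 'while m < len(s) and s[m] == head: m += 1' — started at index k, so it scans s.drop k
def lockRunEQ (head : Int) : List Int → Nat
  | [] => 0
  | x :: t => if x == head then lockRunEQ head t + 1 else 0

def LOCK_alt (arr : List Int) (head : Int) (direction : String) : Int × List Int :=
  let s := PySem.List.sorted arr (fun x => x) false
  let k := lockRunLT head s
  let m := k + lockRunEQ head (s.drop k)
  let left := (PySem.List.slice s none (some (k : Int))).reverse
  let right := PySem.List.slice s (some (m : Int)) none
  let seq := if direction == "left" then left ++ right else right ++ left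
  -- left[-1] / right[-1] are only read under a nonemptiness guard, so getLastD is exact there
  let count :=
    if direction == "left" then
      (if left ≠ [] then head - left.getLastD 0 else 0) +
      (if right ≠ [] then right.getLastD 0 - (if left ≠ [] then left.getLastD 0 else head) else 0)
    else
      (if right ≠ [] then right.getLastD 0 - head else 0) +
      (if left ≠ [] then (if right ≠ [] then right.getLastD 0 else head) - left.getLastD 0 else 0)
  (count, seq)

-- ===== PRECONDITION & SPEC =====
def Spec_LOCK (arr : List Int) (head : Int) (direction : String) (out : Int × List Int) : Prop := out = LOCK_alt arr head direction
instance (arr : List Int) (head : Int) (direction : String) (out : Int × List Int) : Decidable (Spec_LOCK arr head direction out) := by unfold Spec_LOCK; infer_instance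

-- ===== CLAIM (what is proved, stated in full; the proofs are below) =====
def Claim_equal_LOCK : Prop := ∀ (arr : List Int) (head : Int) (direction : String), Dom_LOCK arr head direction → Spec_LOCK arr head direction (LOCK arr head direction)

-- ===== LEMMAS AND PROOFS =====

-- consecutive-distance step used to characterise both sides' seek count
def lockStepB (p : Int × Int) (x : Int) : Int × Int := (p.1 + |p.2 - x|, x)

theorem lock_getLastD (l : List Int) (h : l ≠ []) (d d' : Int) : l.getLastD d = l.getLastD d' := by
  cases l with
  | nil => exact absurd rfl h
  | cons a t => rw [List.getLastD_cons, List.getLastD_cons]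

theorem lock_getD (l : List Int) (h : l ≠ []) (d d' : Int) :
    l.getLast?.getD d = l.getLast?.getD d' := by
  have := lock_getLastD l h d d'
  rwa [List.getLastD_eq_getLast?, List.getLastD_eq_getLast?] at this

theorem lock_getLastD_mem : ∀ (l : List Int) (d : Int), l.getLastD d = d ∨ l.getLastD d ∈ l := by
  intro l
  induction l with
  | nil => exact fun d => Or.inl rfl
  | cons a t ih =>
    intro d
    rw [List.getLastD_cons]
    rcases ih a with he | hm
    · rw [he]; exact Or.inr List.mem_cons_self
    · exact Or.inr (List.mem_cons_of_mem a hm)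

-- in a sorted list the first while loop stops exactly at the lower partition's end
theorem lock_take_runLT (h : Int) : ∀ xs : List Int, xs.Pairwise (· ≤ ·) →
    xs.take (lockRunLT h xs) = xs.filter (fun x => x < h) := by
  intro xs
  induction xs with
  | nil => intro _; simp [lockRunLT]
  | cons x t ih =>
    intro hp
    rw [List.pairwise_cons] at hp
    by_cases hx : x < h
    · simp [lockRunLT, hx, ih hp.2]
    · have : t.filter (fun x => decide (x < h)) = [] := by
        rw [List.filter_eq_nil_iff]
        intro y hy
        simp only [decide_eq_true_eq]
        exact fun hlt => hx (lt_of_le_of_lt (hp.1 y hy) hlt)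
      simp [lockRunLT, hx, this]

theorem lock_drop_runLT (h : Int) : ∀ xs : List Int, xs.Pairwise (· ≤ ·) →
    xs.drop (lockRunLT h xs) = xs.filter (fun x => h ≤ x) := by
  intro xs
  induction xs with
  | nil => intro _; simp [lockRunLT]
  | cons x t ih =>
    intro hp
    rw [List.pairwise_cons] at hp
    by_cases hx : x < h
    · simp [lockRunLT, hx, ih hp.2, show ¬ h ≤ x by omega]
    · have : (x :: t).filter (fun x => decide (h ≤ x)) = x :: t := by
        rw [List.filter_eq_self]
        intro y hy
        simp only [decide_eq_true_eq]
        rcases List.mem_cons.1 hy with rfl | hy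
        · omega
        · exact le_trans (by omega) (hp.1 y hy)
      simp [lockRunLT, hx, this]

-- the second while loop then skips exactly the values equal to head
theorem lock_drop_runEQ (h : Int) : ∀ xs : List Int, xs.Pairwise (· ≤ ·) → (∀ y ∈ xs, h ≤ y) →
    xs.drop (lockRunEQ h xs) = xs.filter (fun x => h < x) := by
  intro xs
  induction xs with
  | nil => intro _ _; simp [lockRunEQ]
  | cons x t ih =>
    intro hp hall
    rw [List.pairwise_cons] at hp
    by_cases hx : x = h
    · subst hx
      simp [lockRunEQ, ih hp.2 (fun y hy => hall y (List.mem_cons_of_mem _ hy))]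
    · have hlt : h < x := lt_of_le_of_ne (hall x (List.mem_cons_self)) (Ne.symm hx)
      have hself : (x :: t).filter (fun x => decide (h < x)) = x :: t := by
        rw [List.filter_eq_self]
        intro y hy
        simp only [decide_eq_true_eq]
        rcases List.mem_cons.1 hy with rfl | hy
        · exact hlt
        · exact lt_of_lt_of_le hlt (hp.1 y hy)
      simp [lockRunEQ, hx, hself]

-- filtering a sorted list is sorting the filtered list
theorem lock_filter_sorted (arr : List Int) (p : Int → Bool) :
    (PySem.List.sorted arr (fun x => x) false).filter p = PySem.List.sorted (arr.filter p) (fun x => x) false := by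
  symm
  apply PySem.List.sorted_id_eq_of_perm_of_pairwise
  · exact (PySem.List.sorted_perm arr (fun x => x) false).filter p
  · exact (PySem.List.sorted_pairwise arr (fun x => x)).filter _

-- over Int values, sorting descending is reversing the ascending sort
theorem lock_sorted_rev (xs : List Int) :
    PySem.List.sorted xs (fun x => x) true = (PySem.List.sorted xs (fun x => x) false).reverse := by
  apply PySem.List.eq_of_perm_of_pairwise_le_of_injective (fun x : Int => -x) neg_injective
  · exact (PySem.List.sorted_perm xs _ true).trans ((PySem.List.sorted_perm xs _ false).symm.trans (List.reverse_perm _).symm)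
  · exact (PySem.List.sorted_pairwise_rev xs (fun x => x)).imp (fun {a b} hab => by omega)
  · exact (List.pairwise_reverse.2 ((PySem.List.sorted_pairwise xs (fun x => x)).imp (fun {a b} hab => by omega)))

theorem lockB_shift : ∀ (xs : List Int) (c h : Int),
    xs.foldl lockStepB (c, h)
      = (c + (xs.foldl lockStepB (0, h)).1, (xs.foldl lockStepB (0, h)).2) := by
  intro xs
  induction xs with
  | nil => intro c h; simp
  | cons x t ih =>
    intro c h
    simp only [List.foldl_cons, lockStepB]
    rw [ih (c + |h - x|) x, ih (0 + |h - x|) x]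
    refine Prod.ext ?_ ?_ <;> simp <;> ring

-- A's inner pass, expressed through the counting fold
theorem lockA_run : ∀ (xs : List Int) (c : Int) (seq : List Int) (h : Int),
    xs.foldl lockStepA (c, seq, h)
      = (c + (xs.foldl lockStepB (0, h)).1, seq ++ xs, (xs.foldl lockStepB (0, h)).2) := by
  intro xs
  induction xs with
  | nil => intro c seq h; simp
  | cons x t ih =>
    intro c seq h
    simp only [List.foldl_cons, lockStepA, lockStepB]
    rw [ih (c + |h - x|) (seq ++ [x]) x, lockB_shift t (0 + |h - x|) x]
    refine Prod.ext ?_ (Prod.ext ?_ ?_) <;> simp <;> ring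

-- distance fold over a descending run started at or below h telescopes to first-minus-last
theorem lock_fold_desc : ∀ (xs : List Int) (h : Int), xs.Pairwise (· ≥ ·) → (∀ y ∈ xs, y ≤ h) →
    xs.foldl lockStepB (0, h) = (h - xs.getLastD h, xs.getLastD h) := by
  intro xs
  induction xs with
  | nil => intro h _ _; simp
  | cons x t ih =>
    intro h hp hall
    rw [List.pairwise_cons] at hp
    have hx : x ≤ h := hall x List.mem_cons_self
    simp only [List.foldl_cons, lockStepB]
    rw [lockB_shift t (0 + |h - x|) x, ih x hp.2 hp.1, List.getLastD_cons]
    have : |h - x| = h - x := abs_of_nonneg (by omega)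
    refine Prod.ext ?_ rfl
    simp [this]

theorem lock_fold_asc : ∀ (xs : List Int) (h : Int), xs.Pairwise (· ≤ ·) → (∀ y ∈ xs, h ≤ y) →
    xs.foldl lockStepB (0, h) = (xs.getLastD h - h, xs.getLastD h) := by
  intro xs
  induction xs with
  | nil => intro h _ _; simp
  | cons x t ih =>
    intro h hp hall
    rw [List.pairwise_cons] at hp
    have hx : h ≤ x := hall x List.mem_cons_self
    simp only [List.foldl_cons, lockStepB]
    rw [lockB_shift t (0 + |h - x|) x, ih x hp.2 hp.1, List.getLastD_cons]
    have : |h - x| = x - h := by rw [abs_sub_comm]; exact abs_of_nonneg (by omega)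
    refine Prod.ext ?_ rfl
    simp [this]

-- the whole-sequence walked count equals B's closed form, left-first order
theorem lock_count_left (L R : List Int) (head : Int)
    (hL : L.Pairwise (· ≥ ·)) (hLlt : ∀ y ∈ L, y < head)
    (hR : R.Pairwise (· ≤ ·)) (hRgt : ∀ y ∈ R, head < y) :
    ((L ++ R).foldl lockStepB (0, head)).1
      = (if L ≠ [] then head - L.getLastD 0 else 0) +
        (if R ≠ [] then R.getLastD 0 - (if L ≠ [] then L.getLastD 0 else head) else 0) := by
  rw [List.foldl_append, lock_fold_desc L head hL (fun y hy => le_of_lt (hLlt y hy)),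
      lockB_shift]
  have hg : ∀ y ∈ R, L.getLastD head ≤ y := by
    intro y hy
    rcases lock_getLastD_mem L head with he | hm
    · rw [he]; exact le_of_lt (hRgt y hy)
    · exact le_of_lt (lt_trans (hLlt _ hm) (hRgt y hy))
  rw [lock_fold_asc R (L.getLastD head) hR hg]
  by_cases hLn : L = []
  · subst hLn
    by_cases hRn : R = []
    · subst hRn; simp
    · simp [hRn, lock_getD R hRn head 0]
  · have hg0 : L.getLastD head = L.getLastD 0 := lock_getLastD L hLn head 0
    by_cases hRn : R = []
    · subst hRn; simp [hLn, lock_getD L hLn head 0]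
    · simp only [hLn, hRn, ne_eq, not_false_iff, if_true]
      rw [hg0, lock_getLastD R hRn (L.getLastD 0) 0]

theorem lock_count_right (L R : List Int) (head : Int)
    (hL : L.Pairwise (· ≥ ·)) (hLlt : ∀ y ∈ L, y < head)
    (hR : R.Pairwise (· ≤ ·)) (hRgt : ∀ y ∈ R, head < y) :
    ((R ++ L).foldl lockStepB (0, head)).1
      = (if R ≠ [] then R.getLastD 0 - head else 0) +
        (if L ≠ [] then (if R ≠ [] then R.getLastD 0 else head) - L.getLastD 0 else 0) := by
  rw [List.foldl_append, lock_fold_asc R head hR (fun y hy => le_of_lt (hRgt y hy)),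
      lockB_shift]
  have hg : ∀ y ∈ L, y ≤ R.getLastD head := by
    intro y hy
    rcases lock_getLastD_mem R head with he | hm
    · rw [he]; exact le_of_lt (hLlt y hy)
    · exact le_of_lt (lt_trans (hLlt _ hy) (hRgt _ hm))
  rw [lock_fold_desc L (R.getLastD head) hL hg]
  by_cases hRn : R = []
  · subst hRn
    by_cases hLn : L = []
    · subst hLn; simp
    · simp [hLn, lock_getD L hLn head 0]
  · have hg0 : R.getLastD head = R.getLastD 0 := lock_getLastD R hRn head 0
    by_cases hLn : L = []
    · subst hLn; simp [hRn, lock_getD R hRn head 0]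
    · simp only [hLn, hRn, ne_eq, not_false_iff, if_true]
      rw [hg0, lock_getLastD L hLn (R.getLastD 0) 0]

-- A's partition pass equals the two filters
theorem lock_part (head : Int) : ∀ (arr l r : List Int),
    arr.foldl (fun (p : List Int × List Int) i =>
      if i < head then (p.1 ++ [i], p.2)
      else if i > head then (p.1, p.2 ++ [i]) else p) (l, r)
      = (l ++ arr.filter (fun i => i < head), r ++ arr.filter (fun i => head < i)) := by
  intro arr
  induction arr with
  | nil => intro l r; simp
  | cons x t ih =>
    intro l r
    by_cases h1 : x < head
    · have h1' : ¬ head < x := fun h => absurd (lt_trans h1 h) (lt_irrefl x)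
      simp [List.foldl_cons, h1, h1', ih]
    · by_cases h2 : x > head
      · simp [List.foldl_cons, h1, h2, ih]
      · simp [List.foldl_cons, h1, h2, ih]

theorem pyRange_two : PySem.List.pyRange 0 2 1 = [0, 1] := by decide

-- B's left slice is exactly A's descending-sorted lower partition
theorem lock_left_eq (arr : List Int) (head : Int) :
    (PySem.List.slice (PySem.List.sorted arr (fun x => x) false) none
        (some ((lockRunLT head (PySem.List.sorted arr (fun x => x) false) : Nat) : Int))).reverse
      = PySem.List.sorted (arr.filter (fun i => i < head)) (fun x => x) true := by
  rw [PySem.List.slice_to_natCast,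
      lock_take_runLT head _ (PySem.List.sorted_pairwise arr (fun x => x)),
      lock_filter_sorted, lock_sorted_rev]

-- B's right slice is exactly A's ascending-sorted upper partition
theorem lock_right_eq (arr : List Int) (head : Int) :
    PySem.List.slice (PySem.List.sorted arr (fun x => x) false)
        (some (((lockRunLT head (PySem.List.sorted arr (fun x => x) false)
                 + lockRunEQ head ((PySem.List.sorted arr (fun x => x) false).drop
                     (lockRunLT head (PySem.List.sorted arr (fun x => x) false))) : Nat) : Int))) none
      = PySem.List.sorted (arr.filter (fun i => head < i)) (fun x => x) false := by
  set s := PySem.List.sorted arr (fun x => x) false with hs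
  have hpair : s.Pairwise (· ≤ ·) := PySem.List.sorted_pairwise arr (fun x => x)
  rw [PySem.List.slice_from_natCast, ← List.drop_drop,
      lock_drop_runLT head s hpair]
  have hall : ∀ y ∈ s.filter (fun x => head ≤ x), head ≤ y := by
    intro y hy
    have := (List.mem_filter.1 hy).2
    exact of_decide_eq_true this
  rw [lock_drop_runEQ head _ (hpair.filter _) hall, List.filter_filter]
  have : (fun x => decide (head < x) && decide (head ≤ x)) = (fun x : Int => decide (head < x)) := by
    funext x
    by_cases h : head < x
    · simp [h, le_of_lt h]
    · simp [h]
  rw [this, lock_filter_sorted]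

theorem lock_main : ∀ (arr : List Int) (head : Int) (direction : String),
    LOCK arr head direction = LOCK_alt arr head direction := by
  intro arr head direction
  unfold LOCK LOCK_alt
  rw [lock_part head arr [] []]
  simp only [List.nil_append, pyRange_two, List.foldl_cons, List.foldl_nil]
  rw [lock_left_eq arr head, lock_right_eq arr head]
  set L := PySem.List.sorted (arr.filter (fun i => i < head)) (fun x => x) true with hLdef
  set R := PySem.List.sorted (arr.filter (fun i => head < i)) (fun x => x) false with hRdef
  have hLlt : ∀ y ∈ L, y < head := by
    intro y hy
    have := (List.mem_filter.1 ((PySem.List.mem_sorted _ _ _ _).1 hy)).2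
    exact of_decide_eq_true this
  have hRgt : ∀ y ∈ R, head < y := by
    intro y hy
    have := (List.mem_filter.1 ((PySem.List.mem_sorted _ _ _ _).1 hy)).2
    exact of_decide_eq_true this
  have hLpair : L.Pairwise (· ≥ ·) := PySem.List.sorted_pairwise_rev _ (fun x => x)
  have hRpair : R.Pairwise (· ≤ ·) := PySem.List.sorted_pairwise _ (fun x => x)
  by_cases hd : direction == "left"
  · simp only [hd, if_true]
    rw [lockA_run L 0 [] head]
    simp only [show (("right" : String) == "left") = false by decide, Bool.false_eq_true, if_false]
    rw [lockA_run R _ _ _]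
    refine Prod.ext ?_ (by simp)
    show 0 + (L.foldl lockStepB (0, head)).1 + (R.foldl lockStepB (0, (L.foldl lockStepB (0, head)).2)).1 = _
    have := lock_count_left L R head hLpair hLlt hRpair hRgt
    rw [List.foldl_append, lockB_shift R (L.foldl lockStepB (0, head)).1 _] at this
    simp only [← this]
    ring
  · simp only [hd, Bool.false_eq_true, if_false]
    rw [lockA_run R 0 [] head]
    simp only [show (("left" : String) == "left") = true by decide, if_true]
    rw [lockA_run L _ _ _]
    refine Prod.ext ?_ (by simp)
    show 0 + (R.foldl lockStepB (0, head)).1 + (L.foldl lockStepB (0, (R.foldl lockStepB (0, head)).2)).1 = _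
    have := lock_count_right L R head hLpair hLlt hRpair hRgt
    rw [List.foldl_append, lockB_shift L (R.foldl lockStepB (0, head)).1 _] at this
    simp only [← this]
    ring

-- ===== VERDICT (by name: the statement is the Claim_ definition above) =====
theorem LOCK_spec : Claim_equal_LOCK := by
  intro arr head direction _
  unfold Spec_LOCK
  exact lock_main arr head direction
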